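-- pv_equiv track=rewrite | github.com/LHY-in-universe/Skills-- | webapp/backend/context_manager.py | _group_into_pairs
-- ===== SOURCE A (Python) =====
-- from typing import List, Dict, Any, Optional, Tuple
--
-- def _group_into_pairs(messages: List[Dict]) -> List[List[Dict]]:
--     """Group messages into atomic units, keeping tool-call pairs together."""
--     groups: List[List[Dict]] = []
--     i = 0
--     while i < len(messages):
--         msg = messages[i]
--         if msg.get("role") == "assistant" and msg.get("tool_calls"):
--             # Collect this assistant msg + all following tool result msgs
--             group = [msg]
--             i += 1
--             while i < len(messages) and messages[i].get("role") == "tool":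
--                 group.append(messages[i])
--                 i += 1
--             groups.append(group)
--         else:
--             groups.append([msg])
--             i += 1
--     return groups
-- ===== SOURCE B (Python) =====
-- from typing import List, Dict
--
-- def _group_into_pairs(messages: List[Dict]) -> List[List[Dict]]:
--     """Group messages into atomic units, keeping tool-call pairs together."""
--     groups: List[List[Dict]] = []
--     open_group = False
--     for msg in messages:
--         if msg.get("role") == "tool" and open_group:
--             groups[-1].append(msg)
--         elif msg.get("role") == "assistant" and msg.get("tool_calls"):
--             groups.append([msg])
--             open_group = True
--         else:
--             groups.append([msg])
--             open_group = False
--     return groups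
-- ===== Notes on version B (the rewrite author's own statement) =====
-- stated objective: simpler
-- what changed: Replaced the nested while loop with a manual index and an inner tool-consuming sub-loop by a single flat for-loop over the messages that keeps an open_group flag and appends trailing tool messages to the last group.
import Mathlib
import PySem

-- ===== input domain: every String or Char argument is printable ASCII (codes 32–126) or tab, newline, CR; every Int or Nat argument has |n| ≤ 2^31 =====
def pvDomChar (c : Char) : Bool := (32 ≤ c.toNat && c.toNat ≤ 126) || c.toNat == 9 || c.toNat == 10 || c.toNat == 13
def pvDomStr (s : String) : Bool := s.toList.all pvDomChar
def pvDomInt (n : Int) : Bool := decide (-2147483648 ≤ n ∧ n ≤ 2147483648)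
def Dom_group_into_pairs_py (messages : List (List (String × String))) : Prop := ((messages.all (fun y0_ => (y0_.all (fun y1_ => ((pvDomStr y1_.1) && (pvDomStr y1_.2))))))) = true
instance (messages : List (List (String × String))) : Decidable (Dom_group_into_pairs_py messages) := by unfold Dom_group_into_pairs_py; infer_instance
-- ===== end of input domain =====

-- B replaces A's nested while loop (manual index + inner tool-consuming sub-loop) by one flat
-- for-loop over the messages that keeps an open_group flag: simpler, same O(n) cost, same return
-- value (neither version mutates the input messages).

-- shared Python-semantics helpers: msg.get(k) and the truthiness/equality tests both sources make
def pvGet (m : List (String × String)) (k : String) : Option String :=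
  (PySem.Dict.mk m).get? k

def pvIsTool (m : List (String × String)) : Bool :=
  pvGet m "role" == some "tool"

-- msg.get("role") == "assistant" and msg.get("tool_calls")  (a missing key or "" is falsy)
def pvIsAsstTC (m : List (String × String)) : Bool :=
  (pvGet m "role" == some "assistant") &&
    (match pvGet m "tool_calls" with
     | none => false
     | some s => !(s == ""))

-- ===== PORT A =====
-- inner 'while i < len(messages) and messages[i].get("role") == "tool"':
-- returns (the consumed tool messages, the remaining messages)
def pvCollectTools : List (List (String × String)) →
    List (List (String × String)) × List (List (String × String))
  | [] => ([], [])
  | m :: rest =>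
    if pvIsTool m then
      let p := pvCollectTools rest
      (m :: p.1, p.2)
    else ([], m :: rest)

theorem pvCollectTools_snd_length (l : List (List (String × String))) :
    (pvCollectTools l).2.length ≤ l.length := by
  induction l with
  | nil => simp [pvCollectTools]
  | cons m rest ih =>
    by_cases h : pvIsTool m = true
    · simp only [pvCollectTools, h, if_true, List.length_cons]
      omega
    · simp [pvCollectTools, h]

def group_into_pairs_py (messages : List (List (String × String))) :
    List (List (List (String × String))) :=
  match messages with
  | [] => []
  | msg :: rest =>
    if pvIsAsstTC msg then
      let p := pvCollectTools rest
      (msg :: p.1) :: group_into_pairs_py p.2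
    else
      [msg] :: group_into_pairs_py rest
termination_by messages.length
decreasing_by
  · exact Nat.lt_succ_of_le (pvCollectTools_snd_length rest)
  · simp

-- ===== PORT B =====
-- groups[-1].append(msg)
def pvAppendLast : List (List (List (String × String))) → List (String × String) →
    List (List (List (String × String)))
  | [], m => [[m]]
  | [g], m => [g ++ [m]]
  | g :: h :: t, m => g :: pvAppendLast (h :: t) m

-- the body of B's for-loop; state = (groups, open_group)
def pvStep (s : List (List (List (String × String))) × Bool) (msg : List (String × String)) :
    List (List (List (String × String))) × Bool :=
  if pvIsTool msg && s.2 then (pvAppendLast s.1 msg, s.2)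
  else if pvIsAsstTC msg then (s.1 ++ [[msg]], true)
  else (s.1 ++ [[msg]], false)

def group_into_pairs_py_alt (messages : List (List (String × String))) :
    List (List (List (String × String))) :=
  (messages.foldl pvStep ([], false)).1

-- ===== PRECONDITION & SPEC =====
def Spec_group_into_pairs_py (messages : List (List (String × String))) (out : List (List (List (String × String)))) : Prop := out = group_into_pairs_py_alt messages
instance (messages : List (List (String × String))) (out : List (List (List (String × String)))) : Decidable (Spec_group_into_pairs_py messages out) := by unfold Spec_group_into_pairs_py; infer_instance

-- ===== CLAIM (what is proved, stated in full; the proofs are below) =====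
def Claim_equal_group_into_pairs_py : Prop := ∀ (messages : List (List (String × String))), Dom_group_into_pairs_py messages → Spec_group_into_pairs_py messages (group_into_pairs_py messages)

-- ===== LEMMAS AND PROOFS =====

theorem pvAppendLast_append (gs : List (List (List (String × String))))
    (g : List (List (String × String))) (m : List (String × String)) :
    pvAppendLast (gs ++ [g]) m = gs ++ [g ++ [m]] := by
  induction gs with
  | nil => simp [pvAppendLast]
  | cons x gs ih =>
    cases gs with
    | nil => simp [pvAppendLast]
    | cons y t => simpa [pvAppendLast] using ih

-- loop invariant relating B's foldl state to A's recursive grouping: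
-- with the flag down the remaining fold appends A's groups; with the flag up and last group g,
-- the leading tool messages join g and the rest proceeds flag-down.
theorem pvMain (msgs : List (List (String × String))) :
    (∀ gs, (msgs.foldl pvStep (gs, false)).1 = gs ++ group_into_pairs_py msgs) ∧
    (∀ gs g, (msgs.foldl pvStep (gs ++ [g], true)).1 =
      gs ++ (g ++ (pvCollectTools msgs).1) :: group_into_pairs_py (pvCollectTools msgs).2) := by
  induction msgs with
  | nil =>
    constructor
    · intro gs; simp [group_into_pairs_py]
    · intro gs g; simp [pvCollectTools, group_into_pairs_py]
  | cons m rest ih =>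
    obtain ⟨ih1, ih2⟩ := ih
    constructor
    · intro gs
      by_cases ha : pvIsAsstTC m = true
      · simp only [List.foldl_cons, pvStep, ha, Bool.and_false, if_false, if_true,
          Bool.false_eq_true]
        rw [show (gs ++ [[m]], true) = (gs ++ [[m]], true) from rfl]
        rw [ih2 gs [m]]
        simp [group_into_pairs_py, ha]
      · simp only [List.foldl_cons, pvStep, ha, Bool.and_false, if_false,
          Bool.false_eq_true]
        rw [ih1 (gs ++ [[m]])]
        simp [group_into_pairs_py, ha]
    · intro gs g
      by_cases ht : pvIsTool m = true
      · simp only [List.foldl_cons, pvStep, ht, Bool.true_and, if_true]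
        rw [pvAppendLast_append]
        rw [ih2 gs (g ++ [m])]
        simp [pvCollectTools, ht]
      · by_cases ha : pvIsAsstTC m = true
        · simp only [List.foldl_cons, pvStep, ht, Bool.false_and, if_false, ha, if_true,
            Bool.false_eq_true]
          rw [show gs ++ [g] ++ [[m]] = (gs ++ [g]) ++ [[m]] from by simp]
          rw [ih2 (gs ++ [g]) [m]]
          simp [pvCollectTools, ht, group_into_pairs_py, ha]
        · simp only [List.foldl_cons, pvStep, ht, Bool.false_and, if_false, ha,
            Bool.false_eq_true]
          rw [ih1 (gs ++ [g] ++ [[m]])]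
          simp [pvCollectTools, ht, group_into_pairs_py, ha]

-- ===== VERDICT (by name: the statement is the Claim_ definition above) =====
theorem group_into_pairs_py_spec : Claim_equal_group_into_pairs_py := by
  intro messages _
  unfold Spec_group_into_pairs_py group_into_pairs_py_alt
  have h := (pvMain messages).1 []
  simp at h
  exact h.symm
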